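-- pv_equiv track=rewrite | github.com/Albert-vincent/project-yatrika | backend/evaluate_yatrika.py | _canonical_variants
-- ===== SOURCE A (Python) =====
-- ALIASES = {
--     "andaman": {
--         "andaman", "andaman and nicobar", "andaman and nicobar islands",
--         "radhanagar beach", "bharatpur beach", "cellular jail",
--     },
--     "ajmer": {
--         "ajmer", "ajmer sharif", "ajmer sharif dargah",
--     },
--     "hampi": {
--         "hampi", "hampi archaeological ruins", "hampi ruins",
--     },
--     "imagica": {
--         "imagica", "imagicaa",
--     },
--     "kanyakumari": {
--         "kanyakumari", "vivekananda rock memorial",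
--     },
--     "kumarakom": {
--         "kumarakom", "kumarakom backwaters",
--     },
--     "mahabalipuram": {
--         "mahabalipuram", "mamallapuram", "shore temple",
--     },
--     "mount abu": {
--         "mount abu", "dilwara temples",
--     },
--     "ooty": {
--         "ooty", "ooty lake", "coonoor", "coonoor tea gardens",
--     },
--     "pondicherry": {
--         "pondicherry", "puducherry",
--     },
--     "pushkar": {
--         "pushkar", "pushkar lake",
--     },
--     "rameswaram": {
--         "rameswaram", "ramanathaswamy temple",
--     },
--     "shimla": {
--         "shimla", "mall road shimla", "the ridge",
--     },
--     "spiti valley": {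
--         "spiti valley", "spiti valley monasteries", "key monastery",
--     },
--     "thekkady": {
--         "thekkady", "periyar tiger reserve thekkady", "periyar tiger reserve",
--     },
--     "udaipur": {
--         "udaipur", "lake pichola", "city palace", "jag mandir",
--     },
--     "varanasi": {
--         "varanasi", "kashi", "banaras",
--     },
-- }
--
-- def _canonical_variants(name: str) -> set:
--     text = name.lower().strip()
--     variants = {text}
--     for canonical, alias_set in ALIASES.items():
--         if text == canonical or text in alias_set:
--             variants.add(canonical)
--             variants.update(alias_set)
--     return variants
-- ===== SOURCE B (Python) =====
-- # Flat precomputed reverse index: every canonical name and every alias maps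
-- # directly to the full variant group it belongs to, so a call is one dict
-- # lookup instead of a scan over all alias entries.
-- INDEX = {
--     "andaman": {"andaman", "andaman and nicobar", "andaman and nicobar islands", "radhanagar beach", "bharatpur beach", "cellular jail"},
--     "andaman and nicobar": {"andaman", "andaman and nicobar", "andaman and nicobar islands", "radhanagar beach", "bharatpur beach", "cellular jail"},
--     "andaman and nicobar islands": {"andaman", "andaman and nicobar", "andaman and nicobar islands", "radhanagar beach", "bharatpur beach", "cellular jail"},
--     "radhanagar beach": {"andaman", "andaman and nicobar", "andaman and nicobar islands", "radhanagar beach", "bharatpur beach", "cellular jail"},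
--     "bharatpur beach": {"andaman", "andaman and nicobar", "andaman and nicobar islands", "radhanagar beach", "bharatpur beach", "cellular jail"},
--     "cellular jail": {"andaman", "andaman and nicobar", "andaman and nicobar islands", "radhanagar beach", "bharatpur beach", "cellular jail"},
--     "ajmer": {"ajmer", "ajmer sharif", "ajmer sharif dargah"},
--     "ajmer sharif": {"ajmer", "ajmer sharif", "ajmer sharif dargah"},
--     "ajmer sharif dargah": {"ajmer", "ajmer sharif", "ajmer sharif dargah"},
--     "hampi": {"hampi", "hampi archaeological ruins", "hampi ruins"},
--     "hampi archaeological ruins": {"hampi", "hampi archaeological ruins", "hampi ruins"},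
--     "hampi ruins": {"hampi", "hampi archaeological ruins", "hampi ruins"},
--     "imagica": {"imagica", "imagicaa"},
--     "imagicaa": {"imagica", "imagicaa"},
--     "kanyakumari": {"kanyakumari", "vivekananda rock memorial"},
--     "vivekananda rock memorial": {"kanyakumari", "vivekananda rock memorial"},
--     "kumarakom": {"kumarakom", "kumarakom backwaters"},
--     "kumarakom backwaters": {"kumarakom", "kumarakom backwaters"},
--     "mahabalipuram": {"mahabalipuram", "mamallapuram", "shore temple"},
--     "mamallapuram": {"mahabalipuram", "mamallapuram", "shore temple"},
--     "shore temple": {"mahabalipuram", "mamallapuram", "shore temple"},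
--     "mount abu": {"mount abu", "dilwara temples"},
--     "dilwara temples": {"mount abu", "dilwara temples"},
--     "ooty": {"ooty", "ooty lake", "coonoor", "coonoor tea gardens"},
--     "ooty lake": {"ooty", "ooty lake", "coonoor", "coonoor tea gardens"},
--     "coonoor": {"ooty", "ooty lake", "coonoor", "coonoor tea gardens"},
--     "coonoor tea gardens": {"ooty", "ooty lake", "coonoor", "coonoor tea gardens"},
--     "pondicherry": {"pondicherry", "puducherry"},
--     "puducherry": {"pondicherry", "puducherry"},
--     "pushkar": {"pushkar", "pushkar lake"},
--     "pushkar lake": {"pushkar", "pushkar lake"},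
--     "rameswaram": {"rameswaram", "ramanathaswamy temple"},
--     "ramanathaswamy temple": {"rameswaram", "ramanathaswamy temple"},
--     "shimla": {"shimla", "mall road shimla", "the ridge"},
--     "mall road shimla": {"shimla", "mall road shimla", "the ridge"},
--     "the ridge": {"shimla", "mall road shimla", "the ridge"},
--     "spiti valley": {"spiti valley", "spiti valley monasteries", "key monastery"},
--     "spiti valley monasteries": {"spiti valley", "spiti valley monasteries", "key monastery"},
--     "key monastery": {"spiti valley", "spiti valley monasteries", "key monastery"},
--     "thekkady": {"thekkady", "periyar tiger reserve thekkady", "periyar tiger reserve"},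
--     "periyar tiger reserve thekkady": {"thekkady", "periyar tiger reserve thekkady", "periyar tiger reserve"},
--     "periyar tiger reserve": {"thekkady", "periyar tiger reserve thekkady", "periyar tiger reserve"},
--     "udaipur": {"udaipur", "lake pichola", "city palace", "jag mandir"},
--     "lake pichola": {"udaipur", "lake pichola", "city palace", "jag mandir"},
--     "city palace": {"udaipur", "lake pichola", "city palace", "jag mandir"},
--     "jag mandir": {"udaipur", "lake pichola", "city palace", "jag mandir"},
--     "varanasi": {"varanasi", "kashi", "banaras"},
--     "kashi": {"varanasi", "kashi", "banaras"},
--     "banaras": {"varanasi", "kashi", "banaras"},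
-- }
--
--
-- def _canonical_variants(name: str) -> set:
--     text = name.lower().strip()
--     return {text} | INDEX.get(text, set())
-- ===== Notes on version B (the rewrite author's own statement) =====
-- stated objective: alternative
-- what changed: Replaced the per-call linear scan over all ALIASES entries (with a membership test in each alias set) by a flat precomputed reverse-index dict mapping every canonical name and alias directly to its full variant group, so each call is a single dict lookup unioned with {text}.
import Mathlib
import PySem

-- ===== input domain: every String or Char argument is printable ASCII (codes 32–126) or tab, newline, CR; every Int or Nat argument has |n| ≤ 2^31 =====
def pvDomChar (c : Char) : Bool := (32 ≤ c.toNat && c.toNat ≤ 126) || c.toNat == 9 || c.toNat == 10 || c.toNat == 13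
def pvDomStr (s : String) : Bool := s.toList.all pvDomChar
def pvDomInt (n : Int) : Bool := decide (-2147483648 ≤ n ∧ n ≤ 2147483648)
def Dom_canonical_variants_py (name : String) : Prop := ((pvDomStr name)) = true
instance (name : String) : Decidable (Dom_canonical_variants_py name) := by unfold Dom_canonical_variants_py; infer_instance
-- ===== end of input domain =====

-- B replaces A's per-call scan over all ALIASES entries by a flat precomputed
-- reverse index (every canonical/alias key -> its full variant group), so a call
-- is a single dict lookup (objective: alternative).


-- ===== PORT A =====
-- ALIASES from the module (alias sets written in their source-literal order)
def pvAliases : List (String × List String) := [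
  ("andaman", ["andaman", "andaman and nicobar", "andaman and nicobar islands", "radhanagar beach", "bharatpur beach", "cellular jail"]),
  ("ajmer", ["ajmer", "ajmer sharif", "ajmer sharif dargah"]),
  ("hampi", ["hampi", "hampi archaeological ruins", "hampi ruins"]),
  ("imagica", ["imagica", "imagicaa"]),
  ("kanyakumari", ["kanyakumari", "vivekananda rock memorial"]),
  ("kumarakom", ["kumarakom", "kumarakom backwaters"]),
  ("mahabalipuram", ["mahabalipuram", "mamallapuram", "shore temple"]),
  ("mount abu", ["mount abu", "dilwara temples"]),
  ("ooty", ["ooty", "ooty lake", "coonoor", "coonoor tea gardens"]),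
  ("pondicherry", ["pondicherry", "puducherry"]),
  ("pushkar", ["pushkar", "pushkar lake"]),
  ("rameswaram", ["rameswaram", "ramanathaswamy temple"]),
  ("shimla", ["shimla", "mall road shimla", "the ridge"]),
  ("spiti valley", ["spiti valley", "spiti valley monasteries", "key monastery"]),
  ("thekkady", ["thekkady", "periyar tiger reserve thekkady", "periyar tiger reserve"]),
  ("udaipur", ["udaipur", "lake pichola", "city palace", "jag mandir"]),
  ("varanasi", ["varanasi", "kashi", "banaras"])
]

-- Python A: text = name.lower().strip(); variants = {text}; scan every ALIASES entry, adding canonical + alias_set on a match.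
def canonical_variants_py (name : String) : List String :=
  let text := PySem.Str.strip (PySem.Str.lower name)
  pvAliases.foldl
    (fun variants p =>
      if text == p.1 || PySem.Set.contains p.2 text then
        p.2.foldl PySem.Set.add (PySem.Set.add variants p.1)
      else variants)
    (PySem.Set.ofList [text])

-- ===== PORT B =====
-- Flat precomputed reverse index from Source B: every key -> its full variant group.
def pvIndex : PySem.Dict String (List String) := PySem.Dict.ofList [
  ("andaman", ["andaman", "andaman and nicobar", "andaman and nicobar islands", "radhanagar beach", "bharatpur beach", "cellular jail"]),
  ("andaman and nicobar", ["andaman", "andaman and nicobar", "andaman and nicobar islands", "radhanagar beach", "bharatpur beach", "cellular jail"]),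
  ("andaman and nicobar islands", ["andaman", "andaman and nicobar", "andaman and nicobar islands", "radhanagar beach", "bharatpur beach", "cellular jail"]),
  ("radhanagar beach", ["andaman", "andaman and nicobar", "andaman and nicobar islands", "radhanagar beach", "bharatpur beach", "cellular jail"]),
  ("bharatpur beach", ["andaman", "andaman and nicobar", "andaman and nicobar islands", "radhanagar beach", "bharatpur beach", "cellular jail"]),
  ("cellular jail", ["andaman", "andaman and nicobar", "andaman and nicobar islands", "radhanagar beach", "bharatpur beach", "cellular jail"]),
  ("ajmer", ["ajmer", "ajmer sharif", "ajmer sharif dargah"]),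
  ("ajmer sharif", ["ajmer", "ajmer sharif", "ajmer sharif dargah"]),
  ("ajmer sharif dargah", ["ajmer", "ajmer sharif", "ajmer sharif dargah"]),
  ("hampi", ["hampi", "hampi archaeological ruins", "hampi ruins"]),
  ("hampi archaeological ruins", ["hampi", "hampi archaeological ruins", "hampi ruins"]),
  ("hampi ruins", ["hampi", "hampi archaeological ruins", "hampi ruins"]),
  ("imagica", ["imagica", "imagicaa"]),
  ("imagicaa", ["imagica", "imagicaa"]),
  ("kanyakumari", ["kanyakumari", "vivekananda rock memorial"]),
  ("vivekananda rock memorial", ["kanyakumari", "vivekananda rock memorial"]),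
  ("kumarakom", ["kumarakom", "kumarakom backwaters"]),
  ("kumarakom backwaters", ["kumarakom", "kumarakom backwaters"]),
  ("mahabalipuram", ["mahabalipuram", "mamallapuram", "shore temple"]),
  ("mamallapuram", ["mahabalipuram", "mamallapuram", "shore temple"]),
  ("shore temple", ["mahabalipuram", "mamallapuram", "shore temple"]),
  ("mount abu", ["mount abu", "dilwara temples"]),
  ("dilwara temples", ["mount abu", "dilwara temples"]),
  ("ooty", ["ooty", "ooty lake", "coonoor", "coonoor tea gardens"]),
  ("ooty lake", ["ooty", "ooty lake", "coonoor", "coonoor tea gardens"]),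
  ("coonoor", ["ooty", "ooty lake", "coonoor", "coonoor tea gardens"]),
  ("coonoor tea gardens", ["ooty", "ooty lake", "coonoor", "coonoor tea gardens"]),
  ("pondicherry", ["pondicherry", "puducherry"]),
  ("puducherry", ["pondicherry", "puducherry"]),
  ("pushkar", ["pushkar", "pushkar lake"]),
  ("pushkar lake", ["pushkar", "pushkar lake"]),
  ("rameswaram", ["rameswaram", "ramanathaswamy temple"]),
  ("ramanathaswamy temple", ["rameswaram", "ramanathaswamy temple"]),
  ("shimla", ["shimla", "mall road shimla", "the ridge"]),
  ("mall road shimla", ["shimla", "mall road shimla", "the ridge"]),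
  ("the ridge", ["shimla", "mall road shimla", "the ridge"]),
  ("spiti valley", ["spiti valley", "spiti valley monasteries", "key monastery"]),
  ("spiti valley monasteries", ["spiti valley", "spiti valley monasteries", "key monastery"]),
  ("key monastery", ["spiti valley", "spiti valley monasteries", "key monastery"]),
  ("thekkady", ["thekkady", "periyar tiger reserve thekkady", "periyar tiger reserve"]),
  ("periyar tiger reserve thekkady", ["thekkady", "periyar tiger reserve thekkady", "periyar tiger reserve"]),
  ("periyar tiger reserve", ["thekkady", "periyar tiger reserve thekkady", "periyar tiger reserve"]),
  ("udaipur", ["udaipur", "lake pichola", "city palace", "jag mandir"]),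
  ("lake pichola", ["udaipur", "lake pichola", "city palace", "jag mandir"]),
  ("city palace", ["udaipur", "lake pichola", "city palace", "jag mandir"]),
  ("jag mandir", ["udaipur", "lake pichola", "city palace", "jag mandir"]),
  ("varanasi", ["varanasi", "kashi", "banaras"]),
  ("kashi", ["varanasi", "kashi", "banaras"]),
  ("banaras", ["varanasi", "kashi", "banaras"])
]

def canonical_variants_py_alt (name : String) : List String :=
  let text := PySem.Str.strip (PySem.Str.lower name)
  PySem.Set.union (PySem.Set.ofList [text]) (PySem.Dict.getD pvIndex text PySem.Set.empty)

-- ===== PRECONDITION & SPEC =====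
def Spec_canonical_variants_py (name : String) (out : List String) : Prop := out = canonical_variants_py_alt name
instance (name : String) (out : List String) : Decidable (Spec_canonical_variants_py name out) := by unfold Spec_canonical_variants_py; infer_instance

-- ===== CLAIM (what is proved, stated in full; the proofs are below) =====
def Claim_equal_canonical_variants_py : Prop := ∀ (name : String), Dom_canonical_variants_py name → Spec_canonical_variants_py name (canonical_variants_py name)

-- ===== LEMMAS AND PROOFS =====

-- both ports as functions of the already-normalised text
def pvRunA (t : String) : List String :=
  pvAliases.foldl
    (fun variants p =>
      if t == p.1 || PySem.Set.contains p.2 t then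
        p.2.foldl PySem.Set.add (PySem.Set.add variants p.1)
      else variants)
    (PySem.Set.ofList [t])

def pvRunB (t : String) : List String :=
  PySem.Set.union (PySem.Set.ofList [t]) (PySem.Dict.getD pvIndex t PySem.Set.empty)

theorem runA_eq (name : String) :
    canonical_variants_py name = pvRunA (PySem.Str.strip (PySem.Str.lower name)) := rfl

theorem runB_eq (name : String) :
    canonical_variants_py_alt name = pvRunB (PySem.Str.strip (PySem.Str.lower name)) := rfl

def pvAllKeys : List String := pvAliases.flatMap (fun p => p.1 :: p.2)

set_option maxRecDepth 8192 in
theorem mem_case : ∀ t ∈ pvAllKeys, pvRunA t = pvRunB t := by decide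

theorem foldl_fix {α β : Type} (l : List β) (f : α → β → α) (a : α)
    (h : ∀ b ∈ l, ∀ x, f x b = x) : l.foldl f a = a := by
  induction l generalizing a with
  | nil => rfl
  | cons b bs ih =>
      rw [List.foldl_cons, h b List.mem_cons_self]
      exact ih a (fun c hc x => h c (List.mem_cons_of_mem _ hc) x)

theorem not_mem_case (t : String) (h : t ∉ pvAllKeys) : pvRunA t = pvRunB t := by
  have hA : pvRunA t = [t] := by
    unfold pvRunA
    rw [foldl_fix]
    · rfl
    · intro p hp x
      have h1 : ¬ t = p.1 := fun he => h (by
        simp only [pvAllKeys, List.mem_flatMap]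
        exact ⟨p, hp, by simp [he]⟩)
      have h2 : t ∉ p.2 := fun he => h (by
        simp only [pvAllKeys, List.mem_flatMap]
        exact ⟨p, hp, by simp [he]⟩)
      simp [PySem.Set.contains, h1, h2]
  have hkeys : t ∉ pvIndex.keys := by
    intro hk
    exact h (by
      have : ∀ s ∈ pvIndex.keys, s ∈ pvAllKeys := by
        set_option maxRecDepth 8192 in decide
      exact this t hk)
  have hget : PySem.Dict.getD pvIndex t PySem.Set.empty = PySem.Set.empty := by
    have hc : pvIndex.contains t = false := by
      by_contra hc
      exact hkeys ((PySem.Dict.contains_iff_mem_keys pvIndex t).1 (by simpa using hc))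
    have hn : pvIndex.get? t = none := (PySem.Dict.get?_eq_none_iff_contains pvIndex t).2 hc
    simp [PySem.Dict.getD, hn]
  have hB : pvRunB t = [t] := by
    unfold pvRunB
    rw [hget]
    rfl
  rw [hA, hB]

-- ===== VERDICT (by name: the statement is the Claim_ definition above) =====
theorem canonical_variants_py_spec : Claim_equal_canonical_variants_py := by
  intro name _
  unfold Spec_canonical_variants_py
  rw [runA_eq, runB_eq]
  by_cases h : PySem.Str.strip (PySem.Str.lower name) ∈ pvAllKeys
  · exact mem_case _ h
  · exact not_mem_case _ h
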